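-- pv_equiv track=rewrite | github.com/howonkim3667-cell/Algorithm | 프로그래머스/0/181855. 문자열 묶기/문자열 묶기.py | solution
-- ===== SOURCE A (Python) =====
-- def solution(strArr):
--     a = {}
--     for i, v in enumerate(strArr):
--         strArr[i] = len(v)
--
--     for i in strArr:
--         a[i] = a.get(i, 0)+1
--
--     a_m = max(a, key=a.get) # 키를 기준으로 값을 가져와서 맥스값 추출
--     return a[a_m]
-- ===== SOURCE B (Python) =====
-- def solution(strArr):
--     # same in-place mutation as A: replace each string by its length
--     for i in range(len(strArr)):
--         strArr[i] = len(strArr[i])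
--     best = 0
--     cur = 0
--     prev = None
--     for x in sorted(strArr):
--         cur = cur + 1 if x == prev else 1
--         prev = x
--         best = max(best, cur)
--     return best
-- ===== Notes on version B (the rewrite author's own statement) =====
-- stated objective: alternative
-- what changed: replaces the dict-counting + max-by-value pass with sorting the lengths and a single scan for the longest run of equal values
import Mathlib
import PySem

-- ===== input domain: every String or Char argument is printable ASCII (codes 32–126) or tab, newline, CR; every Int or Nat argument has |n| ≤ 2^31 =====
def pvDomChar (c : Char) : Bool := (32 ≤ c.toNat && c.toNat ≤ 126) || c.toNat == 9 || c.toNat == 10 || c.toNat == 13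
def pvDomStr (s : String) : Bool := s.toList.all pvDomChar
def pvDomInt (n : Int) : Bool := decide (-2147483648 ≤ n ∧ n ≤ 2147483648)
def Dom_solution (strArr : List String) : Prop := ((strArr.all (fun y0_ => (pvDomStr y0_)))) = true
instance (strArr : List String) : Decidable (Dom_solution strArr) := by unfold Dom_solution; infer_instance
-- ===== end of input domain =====

-- B sorts the lengths and scans for the longest run instead of A's dict counting; both mutate
-- strArr in place the same way in Python, the equivalence proved is about the return value.

-- ===== PORT A =====
-- strArr[i] = len(v) for each i; then count occurrences in a dict; then max key by value.
def solution (strArr : List String) : Int :=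
  let lens := strArr.map (fun v => PySem.Str.len v)
  let a := lens.foldl (fun d i => d.insert i (d.getD i 0 + 1)) PySem.Dict.empty
  match PySem.List.max? a.keys (fun k => a.getD k 0) with
  | some a_m => a.getD a_m 0
  | none => 0   -- unreachable under Pre_: Python raises ValueError here (empty strArr)

-- ===== PORT B =====
-- step of B's scan over the sorted lengths: state = (best, cur, prev)
def altStep (st : Int × Int × Option Int) (x : Int) : Int × Int × Option Int :=
  let cur := if some x = st.2.2 then st.2.1 + 1 else 1
  (max st.1 cur, cur, some x)

def solution_alt (strArr : List String) : Int :=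
  let lens := strArr.map (fun v => PySem.Str.len v)
  ((PySem.List.sorted lens (fun x => x) false).foldl altStep (0, 0, none)).1

-- ===== PRECONDITION & SPEC =====
-- Pre_ excludes exactly the empty list, on which A's `max` raises ValueError.
def Pre_solution (strArr : List String) : Prop := strArr ≠ []
instance (strArr : List String) : Decidable (Pre_solution strArr) := by unfold Pre_solution; infer_instance
def pvWitness_solution : List String := ["a", "bc", "de"]

def Spec_solution (strArr : List String) (out : Int) : Prop := out = solution_alt strArr
instance (strArr : List String) (out : Int) : Decidable (Spec_solution strArr out) := by unfold Spec_solution; infer_instance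

-- ===== CLAIM (what is proved, stated in full; the proofs are below) =====
def Claim_equal_solution : Prop := ∀ (strArr : List String), Dom_solution strArr → Pre_solution strArr → Spec_solution strArr (solution strArr)

-- ===== LEMMAS AND PROOFS =====

-- "m is the maximal multiplicity of an element of l" (both programs' results satisfy this)
def IsMC (l : List Int) (m : Int) : Prop :=
  (∀ v ∈ l, (l.count v : Int) ≤ m) ∧ ∃ v ∈ l, (l.count v : Int) = m

theorem isMC_unique {l : List Int} {m m' : Int} (h : IsMC l m) (h' : IsMC l m') : m = m' := by
  obtain ⟨hle, v, hv, hc⟩ := h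
  obtain ⟨hle', w, hw, hc'⟩ := h'
  have h1 := hle w hw
  have h2 := hle' v hv
  omega

-- invariant of B's scan over a sorted nonempty list
theorem alt_inv (t : List Int) (ht : t ≠ []) (hs : t.Pairwise (· ≤ ·)) :
    ∃ L, (t.foldl altStep (0, 0, none)).2.2 = some L ∧ L ∈ t ∧ (∀ y ∈ t, y ≤ L) ∧
      (t.foldl altStep (0, 0, none)).2.1 = (t.count L : Int) ∧
      IsMC t (t.foldl altStep (0, 0, none)).1 := by
  induction t using List.reverseRecOn with
  | nil => exact absurd rfl ht
  | append_singleton t x ih =>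
    rw [List.foldl_append]
    have hs' : t.Pairwise (· ≤ ·) ∧ ∀ y ∈ t, y ≤ x := by
      rw [List.pairwise_append] at hs
      exact ⟨hs.1, fun y hy => hs.2.2 y hy x (by simp)⟩
    rcases eq_or_ne t [] with rfl | htne
    · refine ⟨x, ?_, by simp, by simp, ?_, ?_⟩ <;>
        simp [altStep, IsMC, List.count_cons]
    · obtain ⟨L, hprev, hLmem, hLmax, hcur, hb⟩ := ih htne hs'.1
      set st := t.foldl altStep (0, 0, (none : Option Int)) with hst
      refine ⟨x, by simp [altStep], by simp, ?_, ?_, ?_⟩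
      · intro y hy
        rcases List.mem_append.mp hy with hy | hy
        · exact hs'.2 y hy
        · simp at hy; omega
      · -- cur component
        rcases eq_or_ne x L with rfl | hne
        · simp [altStep, hprev, hcur, List.count_append]
        · have hxnot : x ∉ t := fun hx =>
            hne (le_antisymm (hLmax x hx) (hs'.2 L hLmem))
          simp [altStep, hprev, hne, List.count_append,
            List.count_eq_zero_of_not_mem hxnot]
      · -- best component
        obtain ⟨hble, v, hvmem, hvc⟩ := hb
        rcases eq_or_ne x L with rfl | hne
        · constructor
          · intro u hu
            rcases List.mem_append.mp hu with hu | hu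
            · rcases eq_or_ne u x with rfl | hux
              · simp [altStep, hprev, hcur, List.count_append]
              · have := hble u hu
                have h0 : List.count u [x] = 0 :=
                  List.count_eq_zero_of_not_mem (by simp [hux])
                simp [altStep, List.count_append, h0]
                omega
            · simp at hu; subst hu
              simp [altStep, hprev, hcur, List.count_append]
          · rcases le_or_gt st.1 ((t.count x : Int) + 1) with hle | hlt
            · refine ⟨x, by simp, ?_⟩
              simp [altStep, hprev, hcur, List.count_append, max_eq_right hle]
            · have hvx : v ≠ x := by intro h; subst h; omega
              refine ⟨v, by simp [hvmem], ?_⟩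
              have h0 : List.count v [x] = 0 :=
                List.count_eq_zero_of_not_mem (by simp [hvx])
              have hcle : (if some x = st.2.2 then st.2.1 + 1 else 1) ≤ st.1 := by
                simp [hprev, hcur]; omega
              simp [altStep, List.count_append, h0, max_eq_left hcle]
              omega
        · have hxnot : x ∉ t := fun hx =>
            hne (le_antisymm (hLmax x hx) (hs'.2 L hLmem))
          constructor
          · intro u hu
            rcases List.mem_append.mp hu with hu | hu
            · have hux : u ≠ x := fun h => hxnot (h ▸ hu)
              have := hble u hu
              have h0 : List.count u [x] = 0 :=
                List.count_eq_zero_of_not_mem (by simp [hux])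
              simp [altStep, List.count_append, h0]
              omega
            · simp at hu
              subst hu
              have h0 : List.count u t = 0 := List.count_eq_zero_of_not_mem hxnot
              simp [altStep, hprev, hne, List.count_append, h0]
          · have h1le : (1 : Int) ≤ st.1 := by
              have h1 := hble v hvmem
              have h2 : 0 < t.count v := List.count_pos_iff.mpr hvmem
              omega
            have hvx : v ≠ x := fun h => hxnot (h ▸ hvmem)
            refine ⟨v, by simp [hvmem], ?_⟩
            have h0 : List.count v [x] = 0 :=
              List.count_eq_zero_of_not_mem (by simp [hvx])
            have hcle : (if some x = st.2.2 then st.2.1 + 1 else 1) ≤ st.1 := by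
              simp [hprev, hne]; omega
            simp [altStep, List.count_append, h0, max_eq_left hcle]
            omega

-- B's result is the maximal multiplicity of the length list
theorem alt_isMC (l : List Int) (hl : l ≠ []) :
    IsMC l (((PySem.List.sorted l (fun x => x) false).foldl altStep (0, 0, none)).1) := by
  set s := PySem.List.sorted l (fun x => x) false with hsdef
  have hperm : s.Perm l := PySem.List.sorted_perm l (fun x => x) false
  have hsne : s ≠ [] := by
    intro h; exact hl ((PySem.List.sorted_eq_nil_iff l (fun x => x) false).mp h)
  have hpw : s.Pairwise (· ≤ ·) := PySem.List.sorted_pairwise l (fun x => x)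
  obtain ⟨L, -, -, -, -, hle, v, hvmem, hvc⟩ := alt_inv s hsne hpw
  refine ⟨fun u hu => ?_, v, hperm.mem_iff.mp hvmem, ?_⟩
  · have := hle u (hperm.mem_iff.mpr hu)
    rwa [hperm.count_eq] at this
  · rwa [hperm.count_eq] at hvc

-- A's result is the maximal multiplicity of the length list
theorem a_isMC (strArr : List String) (h : strArr ≠ []) :
    IsMC (strArr.map (fun v => PySem.Str.len v)) (solution strArr) := by
  set l := strArr.map (fun v => PySem.Str.len v) with hldef
  have hl : l ≠ [] := by simp [hldef, h]
  set a := l.foldl (fun d i => d.insert i (d.getD i 0 + 1))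
    (PySem.Dict.empty : PySem.Dict Int Int) with hadef
  have hkeys : a.keys = PySem.Set.ofList l := by
    rw [hadef, PySem.Dict.keys_foldl_insert]
    simp [PySem.Dict.keys_empty, PySem.Set.update, PySem.Set.ofList_eq_foldl]
  have hgetD : ∀ v, a.getD v 0 = (l.count v : Int) := by
    intro v
    rw [hadef, PySem.Dict.getD_foldl_insert_add_one]
    simp [PySem.Dict.getD_empty]
  have hkne : a.keys ≠ [] := by
    obtain ⟨x, hx⟩ := List.exists_mem_of_ne_nil l hl
    intro hk
    have : x ∈ a.keys := by rw [hkeys]; exact (PySem.Set.mem_ofList l x).mpr hx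
    simp [hk] at this
  obtain ⟨m, hm⟩ : ∃ m, PySem.List.max? a.keys (fun k => a.getD k 0) = some m := by
    cases hmm : PySem.List.max? a.keys (fun k => a.getD k 0) with
    | none => exact absurd ((PySem.List.max?_eq_none_iff _ _).mp hmm) hkne
    | some m => exact ⟨m, rfl⟩
  have hsol : solution strArr =
      (match PySem.List.max? a.keys (fun k => a.getD k 0) with
        | some a_m => a.getD a_m 0
        | none => 0) := rfl
  rw [hsol, hm]
  show IsMC l (a.getD m 0)
  have hmmem : m ∈ l := (PySem.Set.mem_ofList l m).mp (hkeys ▸ PySem.List.max?_mem hm)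
  refine ⟨fun u hu => ?_, m, hmmem, (hgetD m).symm⟩
  · have hu' : u ∈ a.keys := by rw [hkeys]; exact (PySem.Set.mem_ofList l u).mpr hu
    have := PySem.List.max?_isMax hm u hu'
    rw [hgetD u, hgetD m] at this
    rw [hgetD m]
    exact this

-- ===== VERDICT (by name: the statement is the Claim_ definition above) =====
theorem solution_spec : Claim_equal_solution := by
  intro strArr _ hpre
  have hne : strArr ≠ [] := hpre
  unfold Spec_solution solution_alt
  exact isMC_unique (a_isMC strArr hne)
    (alt_isMC _ (fun hmap => hne (List.map_eq_nil_iff.mp hmap)))
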